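-- pv_equiv track=rewrite | github.com/jmyshrall/Practice | homework/h2/src/linear_efficiency.py | hide
-- ===== SOURCE A (Python) =====
-- def hide(sentence):
--     """
--     Creates a new string with characters in `sentence` such that:
--         - all subsequence occurrences of a character in `sentence` are
--         replaced  with '*' in the returned sentence.
--     :param sentence: string
--     :return: string with the first occurrences of each character in `sentence`
--         replaced by '*'
--     :return: empty string or 1-character string identical with `sentence` if
--         `sentence` is empty string or 1-character string
--     Example 1: hide('babble') returns 'ba**le'
--     Example 2: hide('more is less') returns 'more is*l***'
--     """
--     if len(sentence) <= 1:
--         return sentence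
--         # If the input is an empty string or 1-character string
--
--     seen_chars = set()
--     # To keep track of characters that have been seen
--     result = []
--     for char in sentence:
--         if char not in seen_chars:
--             seen_chars.add(char)
--             result.append(char)
--         else:
--             result.append('*')
--
--     return ''.join(result)
-- ===== SOURCE B (Python) =====
-- def hide(sentence):
--     # Masking algorithm: repeatedly take the first remaining character and
--     # blank out all of its later occurrences in the rest before moving on.
--     out = []
--     s = sentence
--     while s:
--         c = s[0]
--         out.append(c)
--         s = s[1:].replace(c, '*')
--     return ''.join(out)
-- ===== Notes on version B (the rewrite author's own statement) =====
-- stated objective: alternative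
-- what changed: Replaces the seen-set single pass (with length guard) by a masking loop: repeatedly emit the first remaining character and blank all its later occurrences in the remainder with asterisks before continuing; no seen set is maintained.
import Mathlib
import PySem

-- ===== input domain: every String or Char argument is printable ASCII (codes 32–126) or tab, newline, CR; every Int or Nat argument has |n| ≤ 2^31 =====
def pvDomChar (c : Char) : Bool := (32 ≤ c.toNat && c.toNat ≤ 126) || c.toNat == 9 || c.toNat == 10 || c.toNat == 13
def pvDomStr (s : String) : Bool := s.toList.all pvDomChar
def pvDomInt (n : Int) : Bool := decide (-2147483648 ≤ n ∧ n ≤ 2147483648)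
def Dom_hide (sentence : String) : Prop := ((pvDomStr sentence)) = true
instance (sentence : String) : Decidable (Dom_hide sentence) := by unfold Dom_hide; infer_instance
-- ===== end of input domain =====

-- B replaces A's seen-set single pass (and its length guard) by a masking loop that
-- emits the first remaining character and blanks its later occurrences with asterisks;
-- objective: alternative (different algorithm, not faster).


-- ===== PORT A =====
-- loop body: 'if char not in seen_chars: seen_chars.add(char); result.append(char) else: result.append("*")'
def hideStep (p : PySem.Set Char × List Char) (c : Char) : PySem.Set Char × List Char :=
  if ¬ (PySem.Set.contains p.1 c = true) then (PySem.Set.add p.1 c, p.2 ++ [c])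
  else (p.1, p.2 ++ ['*'])

def hide (sentence : String) : String :=
  if PySem.Str.len sentence ≤ 1 then sentence
  else
    let st := sentence.toList.foldl hideStep (PySem.Set.empty, [])
    String.ofList st.2    -- ''.join(result)

-- ===== PORT B =====
-- while s: c = s[0]; out.append(c); s = s[1:].replace(c, '*')
-- s[1:].replace(c, '*') with a single-character old is exactly the per-character map below.
def hideAltLoop (s : List Char) (out : List Char) : List Char :=
  match s with
  | [] => out
  | c :: rest => hideAltLoop (rest.map (fun d => if d = c then '*' else d)) (out ++ [c])
termination_by s.length
decreasing_by simp

def hide_alt (sentence : String) : String :=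
  String.ofList (hideAltLoop sentence.toList [])    -- ''.join(out)

-- ===== PRECONDITION & SPEC =====
def Spec_hide (sentence : String) (out : String) : Prop := out = hide_alt sentence
instance (sentence : String) (out : String) : Decidable (Spec_hide sentence out) := by unfold Spec_hide; infer_instance

-- ===== CLAIM (what is proved, stated in full; the proofs are below) =====
def Claim_equal_hide : Prop := ∀ (sentence : String), Dom_hide sentence → Spec_hide sentence (hide sentence)

-- ===== LEMMAS AND PROOFS =====

-- reference form of the output: the already-seen prefix as an accumulator
def hideRef (pre : List Char) : List Char → List Char
  | [] => []
  | c :: rest => (if c ∈ pre then '*' else c) :: hideRef (pre ++ [c]) rest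

-- A's loop computes hideRef
theorem hideLoop_eq_ref (rest : List Char) : ∀ (pre : List Char) (s : PySem.Set Char) (acc : List Char),
    (∀ c, c ∈ s ↔ c ∈ pre) →
    (rest.foldl hideStep (s, acc)).2 = acc ++ hideRef pre rest := by
  induction rest with
  | nil => intro pre s acc _; simp [hideRef]
  | cons c rest ih =>
    intro pre s acc hinv
    by_cases hc : c ∈ pre
    · have hcs : PySem.Set.contains s c = true := by
        simp [PySem.Set.contains]; exact (hinv c).2 hc
      rw [List.foldl_cons, show hideStep (s, acc) c = (s, acc ++ ['*']) by
        simp only [hideStep]; rw [if_neg (not_not_intro hcs)]]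
      rw [ih (pre ++ [c]) s (acc ++ ['*'])
        (by intro d; rw [hinv d]; simp only [List.mem_append, List.mem_singleton]
            exact ⟨Or.inl, fun h => h.elim id (fun e => e ▸ hc)⟩)]
      simp [hideRef, if_pos hc]
    · have hcs : ¬ PySem.Set.contains s c = true := by
        simp [PySem.Set.contains]; exact fun h => hc ((hinv c).1 h)
      rw [List.foldl_cons, show hideStep (s, acc) c = (PySem.Set.add s c, acc ++ [c]) by
        simp only [hideStep]; rw [if_pos hcs]]
      rw [ih (pre ++ [c]) (PySem.Set.add s c) (acc ++ [c])
        (by intro d; rw [PySem.Set.mem_add]; simp [hinv d])]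
      simp [hideRef, if_neg hc]

def maskf (P : List Char) (d : Char) : Char := if d ∈ P then '*' else d

-- B's masking loop computes hideRef too: P (mask set) and Q (seen prefix) may
-- disagree only on '*', which prints as '*' either way.
theorem hideAltLoop_eq_ref (l : List Char) : ∀ (P Q out : List Char),
    (∀ d, d ≠ '*' → (d ∈ P ↔ d ∈ Q)) →
    hideAltLoop (l.map (maskf P)) out = out ++ hideRef Q l := by
  induction l with
  | nil => intro P Q out _; simp [hideAltLoop, hideRef]
  | cons c rest ih =>
    intro P Q out hPQ
    rw [List.map_cons, hideAltLoop, List.map_map]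
    by_cases hstar : maskf P c = '*'
    · have hcor : c ∈ P ∨ c = '*' := by
        by_cases h : c ∈ P
        · exact Or.inl h
        · exact Or.inr (by simpa [maskf, h] using hstar)
      have hmap : ((fun d => if d = '*' then '*' else d) ∘ maskf P) = maskf (P ++ ['*']) := by
        funext d
        simp only [Function.comp_apply, maskf, List.mem_append, List.mem_singleton]
        by_cases hd : d ∈ P
        · simp [hd]
        · by_cases hds : d = '*' <;> simp [hd, hds]
      have hcQ : (if c ∈ Q then '*' else c) = '*' := by
        by_cases hq : c ∈ Q
        · simp [hq]
        · rw [if_neg hq]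
          rcases hcor with h | h
          · by_cases hc : c = '*'
            · exact hc
            · exact absurd ((hPQ c hc).1 h) hq
          · exact h
      rw [hstar, hmap, ih (P ++ ['*']) (Q ++ [c]) (out ++ ['*'])
        (by intro d hd
            simp only [List.mem_append, List.mem_singleton]
            constructor
            · rintro (h | h)
              · exact Or.inl ((hPQ d hd).1 h)
              · exact absurd h hd
            · rintro (h | h)
              · exact Or.inl ((hPQ d hd).2 h)
              · subst h
                rcases hcor with h | h
                · exact Or.inl h
                · exact absurd h hd)]
      simp [hideRef, hcQ]
    · -- maskf P c = c, c ∉ P, c ≠ '*'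
      have hcP : c ∉ P := by
        intro h; exact hstar (by simp [maskf, h])
      have hceq : maskf P c = c := by simp [maskf, hcP]
      have hcstar : c ≠ '*' := fun h => hstar (hceq.trans h)
      have hcQ : c ∉ Q := fun h => hcP ((hPQ c hcstar).2 h)
      have hmap : ((fun d => if d = c then '*' else d) ∘ maskf P) = maskf (P ++ [c]) := by
        funext d
        simp only [Function.comp_apply, maskf, List.mem_append, List.mem_singleton]
        by_cases hd : d ∈ P
        · simp [hd]
        · by_cases hdc : d = c
          · subst hdc; simp [hcP]
          · simp [hd, hdc]
      rw [hceq, hmap, ih (P ++ [c]) (Q ++ [c]) (out ++ [c])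
        (by intro d hd; simp only [List.mem_append, List.mem_singleton, hPQ d hd])]
      simp [hideRef, hcQ]

theorem hideRef_nil_small (l : List Char) (h : l.length ≤ 1) : hideRef [] l = l := by
  match l, h with
  | [], _ => rfl
  | [c], _ => simp [hideRef]

theorem hide_alt_eq_ref (sentence : String) :
    hide_alt sentence = String.ofList (hideRef [] sentence.toList) := by
  unfold hide_alt
  have h := hideAltLoop_eq_ref sentence.toList [] [] [] (fun _ _ => Iff.rfl)
  rw [show maskf [] = id from funext fun d => by simp [maskf], List.map_id] at h
  rw [h]; simp

-- ===== VERDICT (by name: the statement is the Claim_ definition above) =====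
theorem hide_spec : Claim_equal_hide := by
  intro sentence _
  show hide sentence = hide_alt sentence
  rw [hide_alt_eq_ref]
  unfold hide
  split
  next h =>
    rw [hideRef_nil_small _ (by simpa using h), String.ofList_toList]
  next h =>
    show String.ofList (List.foldl hideStep (PySem.Set.empty, []) sentence.toList).2 = _
    rw [hideLoop_eq_ref sentence.toList [] PySem.Set.empty []
      (by intro c; simp [PySem.Set.empty])]
    simp
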